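-- pv_equiv track=rewrite | github.com/Qazalbash/GradVault | SEM2/data-structure-and-algorithms/labs/push down automata.py | L4
-- ===== SOURCE A (Python) =====
-- def push(lst, item):
--     lst.append(item)
--
-- def pop(lst):
--     return lst.pop()
--
-- def is_empty(lst):
--     return len(lst) == 0
--
-- def L4(s):
--     try:
--         stack = []
--         for i in s:
--             if i == "0":
--                 push(stack, i)
--             else:
--                 pop(stack)
--         return not (is_empty(stack))
--     except:
--         return False
-- ===== SOURCE B (Python) =====
-- def L4(s):
--     # Rewriting view: '0' is an opening paren, anything else a closing one.
--     # Repeatedly cancel adjacent "()" pairs; the irreducible remainder is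
--     # ")"*a + "("*b.  A pop-underflow happened iff a > 0, and the stack ends
--     # non-empty iff b > 0, so the answer is: remainder non-empty and free of ")".
--     t = "".join("(" if c == "0" else ")" for c in s)
--     while "()" in t:
--         t = t.replace("()", "")
--     return t != "" and ")" not in t
-- ===== Notes on version B (the rewrite author's own statement) =====
-- stated objective: alternative
-- what changed: Replaces the simulated stack with a string-rewriting reduction: map '0'/other to '('/')', repeatedly delete all adjacent "()" pairs with str.replace, and read the answer off the irreducible remainder (non-empty and without ')'), trading the O(n) stack walk for an O(n^2)-worst-case but stackless cancellation algorithm.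
import Mathlib
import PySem

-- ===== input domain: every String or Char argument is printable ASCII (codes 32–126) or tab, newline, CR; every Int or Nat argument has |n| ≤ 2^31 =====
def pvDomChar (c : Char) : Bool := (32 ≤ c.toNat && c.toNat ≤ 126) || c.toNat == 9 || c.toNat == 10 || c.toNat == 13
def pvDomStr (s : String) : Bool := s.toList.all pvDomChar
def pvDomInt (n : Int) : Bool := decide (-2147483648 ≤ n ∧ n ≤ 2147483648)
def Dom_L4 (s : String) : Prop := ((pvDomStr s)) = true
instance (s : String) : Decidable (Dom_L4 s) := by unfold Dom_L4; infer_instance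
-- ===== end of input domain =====

-- B replaces A's stack simulation (with try/except) by a string-rewriting reduction:
-- map '0'/other to '('/')', repeatedly delete all adjacent "()" pairs, and read the
-- answer off the irreducible remainder (alternative algorithm, not claimed faster).


-- ===== PORT A =====
-- loop over the characters keeping the list stack; a pop from the empty stack raises
-- IndexError, caught by the bare except → return False (ported as the [] branch).
def L4_goA : List Char → List Char → Bool
  | [], stack => !(stack.length == 0)
  | c :: rest, stack =>
    if c == '0' then L4_goA rest (stack ++ [c])
    else
      match stack with
      | [] => false                      -- pop() raised; except: return False
      | _ => L4_goA rest stack.dropLast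

def L4 (s : String) : Bool := L4_goA s.toList []

-- ===== PORT B =====
-- reference model of one 'replace all "()" by ""' pass, used to justify that the
-- while-loop terminates (each pass shortens the string when "()" occurs in it);
-- cited by name in L4_altLoop's decreasing_by, hence placed above the port.
def pvCancel : List Char → List Char
  | [] => []
  | [c] => [c]
  | c :: d :: t => if c = '(' ∧ d = ')' then pvCancel t else c :: pvCancel (d :: t)

theorem pvReplace_eq_cancel_go : ∀ (fuel : Nat) (l acc : List Char), l.length ≤ fuel →
    PySem.Chars.replace.go ['(', ')'] [] fuel l acc = acc.reverse ++ pvCancel l := by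
  intro fuel
  induction fuel with
  | zero =>
    intro l acc h
    interval_cases hl : l.length
    · rw [List.length_eq_zero_iff] at hl
      subst hl
      simp [PySem.Chars.replace.go, pvCancel]
  | succ f ih =>
    intro l acc h
    match l with
    | [] => simp [PySem.Chars.replace.go, pvCancel]
    | [c] =>
      by_cases hc : (['(', ')'] : List Char).isPrefixOf [c]
      · simp [List.isPrefixOf] at hc
      · rw [PySem.Chars.replace.go]
        simp only [hc, Bool.false_eq_true, if_false]
        rw [ih [] (c :: acc) (by simp)]
        simp [pvCancel]
    | c :: d :: t =>
      by_cases hp : c = '(' ∧ d = ')'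
      · obtain ⟨rfl, rfl⟩ := hp
        rw [PySem.Chars.replace.go]
        have hpre : (['(', ')'] : List Char).isPrefixOf ('(' :: ')' :: t) = true := by
          simp [List.isPrefixOf]
        simp only [hpre, if_true]
        rw [show (['(', ')'] : List Char).length = 2 from rfl]
        simp only [List.drop_succ_cons, List.drop_zero, List.reverse_nil, List.nil_append]
        rw [ih t acc (by simp at h ⊢; omega)]
        simp [pvCancel]
      · have hpre : (['(', ')'] : List Char).isPrefixOf (c :: d :: t) = false := by
          by_contra hx
          simp only [Bool.not_eq_false] at hx
          rw [List.isPrefixOf_iff_prefix] at hx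
          obtain ⟨u, hu⟩ := hx
          cases hu
          exact hp ⟨rfl, rfl⟩
        rw [PySem.Chars.replace.go]
        simp only [hpre, Bool.false_eq_true, if_false]
        rw [ih (d :: t) (c :: acc) (by simp at h ⊢; omega)]
        simp only [pvCancel, hp, if_false]
        simp

theorem pvReplace_eq_cancel (t : List Char) :
    PySem.Chars.replace t ['(', ')'] [] = pvCancel t := by
  unfold PySem.Chars.replace
  simp only [List.isEmpty_cons, Bool.false_eq_true, if_false]
  exact pvReplace_eq_cancel_go t.length t [] le_rfl

theorem pvCancel_length_le (t : List Char) : (pvCancel t).length ≤ t.length := by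
  induction t using pvCancel.induct with
  | case1 => simp [pvCancel]
  | case2 c => simp [pvCancel]
  | case3 c d t h ih => simp only [pvCancel, h]; simp; omega
  | case4 c d t h ih => simp only [pvCancel, h, if_false]; simpa using ih

theorem pvCancel_length_lt (t : List Char) (h : PySem.Chars.isIn ['(', ')'] t = true) :
    (pvCancel t).length < t.length := by
  rw [PySem.Chars.isIn_iff_infix] at h
  induction t using pvCancel.induct with
  | case1 => simp at h
  | case2 c =>
    exfalso
    have := h.sublist.length_le
    simp at this
  | case3 c d t hp ih =>
    simp only [pvCancel, hp]
    have := pvCancel_length_le t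
    simp
    omega
  | case4 c d t hp ih =>
    simp only [pvCancel, hp, if_false]
    have hdt : (['(', ')'] : List Char) <:+: (d :: t) := by
      rcases List.infix_cons_iff.mp h with hpre | hinf
      · exfalso
        obtain ⟨u, hu⟩ := hpre
        cases hu
        exact hp ⟨rfl, rfl⟩
      · exact hinf
    have := ih hdt
    simpa using this

theorem pvReplace_length_lt (t : List Char) (h : PySem.Chars.isIn ['(', ')'] t = true) :
    (PySem.Chars.replace t ['(', ')'] []).length < t.length := by
  rw [pvReplace_eq_cancel]; exact pvCancel_length_lt t h

-- while "()" in t: t = t.replace("()", "")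
def L4_altLoop (t : List Char) : List Char :=
  if h : PySem.Chars.isIn ['(', ')'] t then L4_altLoop (PySem.Chars.replace t ['(', ')'] []) else t
termination_by t.length
decreasing_by exact pvReplace_length_lt t h

def L4_alt (s : String) : Bool :=
  -- t = "".join("(" if c == "0" else ")" for c in s)
  let t : List Char := s.toList.map (fun c => if c == '0' then '(' else ')')
  let r := L4_altLoop t
  -- return t != "" and ")" not in t
  decide (r ≠ []) && !(PySem.Chars.isIn [')'] r)

-- ===== PRECONDITION & SPEC =====
def Spec_L4 (s : String) (out : Bool) : Prop := out = L4_alt s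
instance (s : String) (out : Bool) : Decidable (Spec_L4 s out) := by unfold Spec_L4; infer_instance

-- ===== CLAIM (what is proved, stated in full; the proofs are below) =====
def Claim_equal_L4 : Prop := ∀ (s : String), Dom_L4 s → Spec_L4 s (L4 s)

-- ===== LEMMAS AND PROOFS =====

-- evaluation of a parenthesis word against a counter; none = pop-underflow
def pvEval : List Char → Nat → Option Nat
  | [], n => some n
  | c :: t, n => if c = '(' then pvEval t (n + 1) else
      match n with
      | 0 => none
      | m + 1 => pvEval t m

-- A's stack loop computes pvEval of the translated word, with the stack length as counter
theorem L4_goA_eq_pvEval : ∀ (l : List Char) (stack : List Char),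
    L4_goA l stack =
      (match pvEval (l.map (fun c => if c == '0' then '(' else ')')) stack.length with
       | none => false
       | some n => decide (n ≠ 0)) := by
  intro l
  induction l with
  | nil =>
    intro stack
    cases stack <;> simp [L4_goA, pvEval]
  | cons c rest ih =>
    intro stack
    by_cases hc : c == '0'
    · simp only [L4_goA, hc, if_pos, List.map_cons, pvEval]
      rw [ih]
      simp
    · cases stack with
      | nil =>
        simp only [L4_goA, hc, Bool.false_eq_true, if_false, List.map_cons]
        simp [pvEval]
      | cons a as =>
        simp only [L4_goA, hc, Bool.false_eq_true, if_false, List.map_cons]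
        rw [ih]
        simp [pvEval, List.length_dropLast]

-- cancelling adjacent "()" pairs does not change the evaluation
theorem pvEval_cancel : ∀ (t : List Char) (n : Nat), pvEval (pvCancel t) n = pvEval t n := by
  intro t
  induction t using pvCancel.induct with
  | case1 => intro n; rfl
  | case2 c => intro n; rfl
  | case3 c d t hp ih =>
    intro n
    rcases hp with ⟨rfl, rfl⟩
    have hc : pvCancel ('(' :: ')' :: t) = pvCancel t := by simp [pvCancel]
    rw [hc, ih]
    simp [pvEval]
  | case4 c d t hp ih =>
    intro n
    have hc : pvCancel (c :: d :: t) = c :: pvCancel (d :: t) := by simp [pvCancel, hp]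
    rw [hc]
    by_cases hcc : c = '('
    · simp [pvEval, hcc, ih]
    · cases n with
      | zero => simp [pvEval, hcc]
      | succ m => simp [pvEval, hcc, ih]

theorem pvEval_loop : ∀ (t : List Char) (n : Nat), pvEval (L4_altLoop t) n = pvEval t n := by
  intro t
  induction t using L4_altLoop.induct with
  | case1 t h ih =>
    intro n
    rw [L4_altLoop, dif_pos h, ih, pvReplace_eq_cancel, pvEval_cancel]
  | case2 t _h =>
    intro n
    rw [L4_altLoop, dif_neg _h]

theorem loop_no_pair (t : List Char) : PySem.Chars.isIn ['(', ')'] (L4_altLoop t) = false := by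
  induction t using L4_altLoop.induct with
  | case1 t h ih => rw [L4_altLoop, dif_pos h]; exact ih
  | case2 t h => rw [L4_altLoop, dif_neg h]; simpa using h

theorem pvCancel_subset (t : List Char) : ∀ x ∈ pvCancel t, x ∈ t := by
  induction t using pvCancel.induct with
  | case1 => simp [pvCancel]
  | case2 c => simp [pvCancel]
  | case3 c d t hp ih =>
    rcases hp with ⟨rfl, rfl⟩
    have hc : pvCancel ('(' :: ')' :: t) = pvCancel t := by simp [pvCancel]
    rw [hc]
    intro x hx
    simp [ih x hx]
  | case4 c d t hp ih =>
    have hc : pvCancel (c :: d :: t) = c :: pvCancel (d :: t) := by simp [pvCancel, hp]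
    rw [hc]
    intro x hx
    rw [List.mem_cons] at hx
    rcases hx with rfl | hx
    · simp
    · simpa using Or.inr (ih x hx)

theorem loop_subset (t : List Char) : ∀ x ∈ L4_altLoop t, x ∈ t := by
  induction t using L4_altLoop.induct with
  | case1 t h ih =>
    rw [L4_altLoop, dif_pos h]
    intro x hx
    have := ih x hx
    rw [pvReplace_eq_cancel] at this
    exact pvCancel_subset t x this
  | case2 t h =>
    rw [L4_altLoop, dif_neg h]
    exact fun x hx => hx

theorem singleton_infix_iff (a : Char) (l : List Char) : [a] <:+: l ↔ a ∈ l := by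
  constructor
  · intro h
    exact List.singleton_sublist.mp h.sublist
  · intro h
    obtain ⟨u, v, hu⟩ := List.append_of_mem h
    exact ⟨u, v, by simp [hu]⟩

-- a pair-free word over {'(', ')'} starting with '(' consists of '(' only
theorem all_open_of_pair_free : ∀ (r : List Char),
    (∀ x ∈ '(' :: r, x = '(' ∨ x = ')') → ¬ ((['(', ')'] : List Char) <:+: ('(' :: r)) →
    ∀ x ∈ '(' :: r, x = '(' := by
  intro r
  induction r with
  | nil => intro _ _ x hx; simpa using hx
  | cons d r ih =>
    intro halpha hpair x hx
    have hd : d = '(' := by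
      rcases halpha d (by simp) with h | h
      · exact h
      · exfalso
        exact hpair ⟨[], r, by simp [h]⟩
    subst hd
    rw [List.mem_cons] at hx
    rcases hx with rfl | hx
    · rfl
    · exact ih (fun y hy => halpha y (List.mem_cons_of_mem _ hy))
        (fun hc => hpair (hc.trans (List.suffix_cons '(' ('(' :: r)).isInfix)) x hx

theorem pvEval_all_open : ∀ (t : List Char) (n : Nat),
    (∀ x ∈ t, x = '(') → pvEval t n = some (n + t.length) := by
  intro t
  induction t with
  | nil => intro n _; simp [pvEval]
  | cons c r ih =>
    intro n h
    have hc : c = '(' := h c (by simp)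
    subst hc
    simp only [pvEval]
    rw [ih (n + 1) (fun x hx => h x (by simp [hx]))]
    simp
    omega

-- ===== VERDICT (by name: the statement is the Claim_ definition above) =====
theorem L4_spec : Claim_equal_L4 := by
  intro s _
  unfold Spec_L4 L4 L4_alt
  rw [L4_goA_eq_pvEval]
  simp only [List.length_nil]
  set t := s.toList.map (fun c => if c == '0' then '(' else ')') with ht
  have halpha : ∀ x ∈ t, x = '(' ∨ x = ')' := by
    intro x hx
    rw [ht] at hx
    simp only [List.mem_map] at hx
    obtain ⟨c, _, hc⟩ := hx
    by_cases h0 : c == '0'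
    · left; rw [← hc]; simp [h0]
    · right; rw [← hc]; simp [h0]
  rw [← pvEval_loop t 0]
  set r := L4_altLoop t with hr
  have hsub : ∀ x ∈ r, x ∈ t := loop_subset t
  have hnp : PySem.Chars.isIn ['(', ')'] r = false := loop_no_pair t
  rw [PySem.Chars.isIn_eq_false_iff] at hnp
  match hre : r with
  | [] => simp [pvEval]
  | c :: rest =>
    rcases halpha c (hsub c (by simp)) with hc | hc
    · -- head '(' : the whole remainder is '('
      subst hc
      have hall : ∀ x ∈ '(' :: rest, x = '(' :=
        all_open_of_pair_free rest (fun x hx => halpha x (hsub x (hre ▸ hx))) (hre ▸ hnp)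
      rw [pvEval_all_open _ 0 hall]
      have hnotin : PySem.Chars.isIn [')'] ('(' :: rest) = false := by
        rw [PySem.Chars.isIn_eq_false_iff, singleton_infix_iff]
        intro hmem
        have := hall ')' hmem
        simp at this
      simp [hnotin]
    · -- head ')' : A underflows, B sees ')' in the remainder
      subst hc
      have hin : PySem.Chars.isIn [')'] (')' :: rest) = true := by
        rw [PySem.Chars.isIn_iff_infix, singleton_infix_iff]
        simp
      simp [pvEval, hin]
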